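-- pv_equiv track=rewrite | github.com/RSashimi/googlestep | week-3/hw-4.py | evaluate_parentheses
-- ===== SOURCE A (Python) =====
-- def evaluate_parentheses(tokens):
--     stack = []
--     output = []
--
--     for token in tokens:
--         if token['type'] == 'LEFT_PAREN':
--             stack.append(token)
--         elif token['type'] == 'RIGHT_PAREN':
--             while stack and stack[-1]['type'] != 'LEFT_PAREN':
--                 output.append(stack.pop())
--             if stack:  # Remove left parenthesis
--                 stack.pop()
--         else:
--             output.append(token)
--
--
--     return output
-- ===== SOURCE B (Python) =====
-- def evaluate_parentheses(tokens):
--     return [t for t in tokens if t['type'] not in ('LEFT_PAREN', 'RIGHT_PAREN')]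
-- ===== Notes on version B (the rewrite author's own statement) =====
-- stated objective: simpler
-- what changed: A's stack only ever receives LEFT_PAREN tokens, so its inner while-loop never pops; B replaces the stack machinery with a single filter that drops every parenthesis token.
import Mathlib
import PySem

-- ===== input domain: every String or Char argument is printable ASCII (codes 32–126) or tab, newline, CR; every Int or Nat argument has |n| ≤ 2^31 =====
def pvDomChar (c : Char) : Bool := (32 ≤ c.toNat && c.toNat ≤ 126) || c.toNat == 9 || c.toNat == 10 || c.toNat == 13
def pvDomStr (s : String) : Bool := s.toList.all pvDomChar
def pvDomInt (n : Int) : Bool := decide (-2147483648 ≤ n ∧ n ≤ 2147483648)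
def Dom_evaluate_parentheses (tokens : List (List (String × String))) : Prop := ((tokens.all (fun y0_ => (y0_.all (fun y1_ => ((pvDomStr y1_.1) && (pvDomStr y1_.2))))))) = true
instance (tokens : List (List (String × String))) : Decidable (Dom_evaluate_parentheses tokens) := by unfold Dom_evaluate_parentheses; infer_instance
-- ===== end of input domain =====

-- B drops A's dead stack (only LEFT_PAREN is ever pushed, so its while-loop never pops)
-- and simply filters out all parenthesis tokens; objective: simpler.

-- ===== PORT A =====
-- token['type'] as first-match assoc lookup; under Pre_ the key exists, so getD "" is exact
-- (a missing "type" key is a Python KeyError, excluded by Pre_).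
def pvTypeOf (t : List (String × String)) : String :=
  (((t.find? (fun p => p.1 == "type")).map (·.2)).getD "")

-- the inner 'while stack and stack[-1]['type'] != 'LEFT_PAREN'' loop (stack head = Python stack top)
def pvPopWhile (stack output : List (List (String × String))) :
    List (List (String × String)) × List (List (String × String)) :=
  match stack with
  | [] => ([], output)
  | h :: rest =>
    if pvTypeOf h != "LEFT_PAREN" then pvPopWhile rest (output ++ [h])
    else (h :: rest, output)

def pvStepA (st : List (List (String × String)) × List (List (String × String)))
    (token : List (String × String)) :
    List (List (String × String)) × List (List (String × String)) :=
  if pvTypeOf token == "LEFT_PAREN" then (token :: st.1, st.2)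
  else if pvTypeOf token == "RIGHT_PAREN" then
    let r := pvPopWhile st.1 st.2
    (if r.1 ≠ [] then r.1.tail else r.1, r.2)
  else (st.1, st.2 ++ [token])

def evaluate_parentheses (tokens : List (List (String × String))) : List (List (String × String)) :=
  (tokens.foldl pvStepA ([], [])).2

-- ===== PORT B =====
def evaluate_parentheses_alt (tokens : List (List (String × String))) : List (List (String × String)) :=
  tokens.filter (fun t => pvTypeOf t != "LEFT_PAREN" && pvTypeOf t != "RIGHT_PAREN")

-- ===== PRECONDITION & SPEC =====
-- Pre_ excludes exactly the tokens without a "type" key, on which Python A raises KeyError.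
def Pre_evaluate_parentheses (tokens : List (List (String × String))) : Prop :=
  ∀ t ∈ tokens, (t.find? (fun p => p.1 == "type")).isSome
instance (tokens : List (List (String × String))) : Decidable (Pre_evaluate_parentheses tokens) := by unfold Pre_evaluate_parentheses; infer_instance
def pvWitness_evaluate_parentheses : (List (List (String × String))) :=
  [[("type", "LEFT_PAREN")], [("type", "NUMBER"), ("value", "3")], [("type", "RIGHT_PAREN")]]

def Spec_evaluate_parentheses (tokens : List (List (String × String))) (out : List (List (String × String))) : Prop := out = evaluate_parentheses_alt tokens
instance (tokens : List (List (String × String))) (out : List (List (String × String))) : Decidable (Spec_evaluate_parentheses tokens out) := by unfold Spec_evaluate_parentheses; infer_instance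

-- ===== CLAIM (what is proved, stated in full; the proofs are below) =====
def Claim_equal_evaluate_parentheses : Prop := ∀ (tokens : List (List (String × String))), Dom_evaluate_parentheses tokens → Pre_evaluate_parentheses tokens → Spec_evaluate_parentheses tokens (evaluate_parentheses tokens)

-- ===== LEMMAS AND PROOFS =====

-- on a stack containing only LEFT_PAREN tokens the while-loop does nothing
theorem pvPopWhile_of_all (stack output : List (List (String × String)))
    (h : ∀ t ∈ stack, pvTypeOf t = "LEFT_PAREN") :
    pvPopWhile stack output = (stack, output) := by
  cases stack with
  | nil => rfl
  | cons x rest =>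
    have hx : pvTypeOf x = "LEFT_PAREN" := h x (by simp)
    simp [pvPopWhile, hx]

-- loop invariant: with an all-LEFT_PAREN stack, the fold's output is output ++ filter
theorem pvFoldA_eq (tokens : List (List (String × String)))
    (stack output : List (List (String × String)))
    (h : ∀ t ∈ stack, pvTypeOf t = "LEFT_PAREN") :
    (tokens.foldl pvStepA (stack, output)).2
      = output ++ tokens.filter (fun t => pvTypeOf t != "LEFT_PAREN" && pvTypeOf t != "RIGHT_PAREN") := by
  induction tokens generalizing stack output with
  | nil => simp
  | cons tok rest ih =>
    by_cases hl : pvTypeOf tok = "LEFT_PAREN"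
    · have := ih (tok :: stack) output (by intro t ht; rcases List.mem_cons.mp ht with rfl | h2; exact hl; exact h t h2)
      simpa [pvStepA, hl, List.filter_cons] using this
    · by_cases hr : pvTypeOf tok = "RIGHT_PAREN"
      · have hpop := pvPopWhile_of_all stack output h
        have hst : ∀ t ∈ (if stack ≠ [] then stack.tail else stack), pvTypeOf t = "LEFT_PAREN" := by
          intro t ht
          split at ht
          · exact h t (List.mem_of_mem_tail ht)
          · exact h t ht
        have := ih _ output hst
        simp only [List.foldl_cons, pvStepA, hr, hpop]
        simpa [pvStepA, hl, hr, hpop, List.filter_cons] using this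
      · have := ih stack (output ++ [tok]) h
        simpa [pvStepA, hl, hr, List.filter_cons] using this

-- ===== VERDICT (by name: the statement is the Claim_ definition above) =====
theorem evaluate_parentheses_spec : Claim_equal_evaluate_parentheses := by
  intro tokens _ _
  show evaluate_parentheses tokens = evaluate_parentheses_alt tokens
  have := pvFoldA_eq tokens [] [] (by simp)
  simpa [evaluate_parentheses, evaluate_parentheses_alt] using this
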